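-- pv_equiv track=rewrite | github.com/Davv7d/project_patterns | Builder.py | parse
-- ===== SOURCE A (Python) =====
-- def parse(html_parsed):
--     pomiedzy_znakami_html = False
--     i = 0
--     text = ""
--     for xy in html_parsed:
--         if xy[1] == 0:
--             if pomiedzy_znakami_html == False:
--                 pomiedzy_znakami_html = True
--             else:
--                 pomiedzy_znakami_html = False
--         elif pomiedzy_znakami_html == True:
--             if xy[1] == 3:
--                 text +=  str("{" + xy[0] + "#")
--             if xy[1] == 4:
--                 text += str(xy[0]+"}")
--         else:
--             if xy[1] == 4:
--                 text += xy[0]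
--         i += 1
--     return text
-- ===== SOURCE B (Python) =====
-- def _piece(xy, inside):
--     if inside:
--         if xy[1] == 3:
--             return "{" + xy[0] + "#"
--         if xy[1] == 4:
--             return xy[0] + "}"
--     elif xy[1] == 4:
--         return xy[0]
--     return ""
--
--
-- def parse(html_parsed):
--     flags = []
--     inside = False
--     for xy in html_parsed:
--         flags.append(inside)
--         if xy[1] == 0:
--             inside = not inside
--     return "".join(_piece(xy, f) for xy, f in zip(html_parsed, flags))
-- ===== Notes on version B (the rewrite author's own statement) =====
-- stated objective: alternative
-- what changed: Replaces the single stateful accumulation loop by two passes: a prefix scan computing each token's inside/outside parity flag, then a map over zip(tokens, flags) producing per-token pieces joined at the end.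
import Mathlib
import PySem

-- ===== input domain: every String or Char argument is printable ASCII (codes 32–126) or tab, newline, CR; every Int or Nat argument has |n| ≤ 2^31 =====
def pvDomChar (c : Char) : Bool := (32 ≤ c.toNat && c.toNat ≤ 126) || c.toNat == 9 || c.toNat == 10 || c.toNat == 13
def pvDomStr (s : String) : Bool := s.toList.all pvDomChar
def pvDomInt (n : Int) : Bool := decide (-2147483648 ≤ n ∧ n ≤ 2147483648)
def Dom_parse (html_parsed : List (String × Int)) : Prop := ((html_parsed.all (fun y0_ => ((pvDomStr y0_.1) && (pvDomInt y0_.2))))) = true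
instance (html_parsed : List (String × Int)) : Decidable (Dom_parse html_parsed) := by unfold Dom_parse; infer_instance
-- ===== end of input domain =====

-- B restates A's single stateful loop as a prefix parity-flag scan followed by a map+join pass (objective: alternative decomposition, same cost).

-- ===== PORT A =====
-- A: one fold carrying the (inside-flag, accumulated text) state; the dead counter `i` is omitted.
def parseStepA (st : Bool × String) (xy : String × Int) : Bool × String :=
  if xy.2 = 0 then (!st.1, st.2)
  else if st.1 = true then
    (st.1,
      (if xy.2 = 3 then st.2 ++ ("{" ++ xy.1 ++ "#") else st.2) |>
        (fun t => if xy.2 = 4 then t ++ (xy.1 ++ "}") else t))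
  else (st.1, if xy.2 = 4 then st.2 ++ xy.1 else st.2)

def parse (html_parsed : List (String × Int)) : String :=
  (html_parsed.foldl parseStepA (false, "")).2

-- ===== PORT B =====
def pieceB (xy : String × Int) (inside : Bool) : String :=
  if inside then
    if xy.2 = 3 then "{" ++ xy.1 ++ "#"
    else if xy.2 = 4 then xy.1 ++ "}"
    else ""
  else if xy.2 = 4 then xy.1 else ""

def flagsB : List (String × Int) → Bool → List Bool
  | [], _ => []
  | xy :: rest, inside => inside :: flagsB rest (if xy.2 = 0 then !inside else inside)

def parse_alt (html_parsed : List (String × Int)) : String :=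
  String.join (((html_parsed.zip (flagsB html_parsed false)).map (fun p => pieceB p.1 p.2)))

-- ===== PRECONDITION & SPEC =====
def Spec_parse (html_parsed : List (String × Int)) (out : String) : Prop := out = parse_alt html_parsed
instance (html_parsed : List (String × Int)) (out : String) : Decidable (Spec_parse html_parsed out) := by unfold Spec_parse; infer_instance

-- ===== CLAIM (what is proved, stated in full; the proofs are below) =====
def Claim_equal_parse : Prop := ∀ (html_parsed : List (String × Int)), Dom_parse html_parsed → Spec_parse html_parsed (parse html_parsed)

-- ===== LEMMAS AND PROOFS =====
theorem foldl_str (ss : List String) : ∀ (a : String),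
    List.foldl (fun r s => r ++ s) a ss = a ++ List.foldl (fun r s => r ++ s) "" ss := by
  induction ss with
  | nil => intro a; simp
  | cons s rest ih =>
    intro a
    simp only [List.foldl]
    rw [ih (a ++ s), ih ("" ++ s), String.append_assoc]
    simp

theorem key : ∀ (l : List (String × Int)) (p : Bool) (text : String),
    (l.foldl parseStepA (p, text)).2
      = text ++ String.join ((l.zip (flagsB l p)).map (fun q => pieceB q.1 q.2)) := by
  intro l
  induction l with
  | nil => intro p text; simp [String.join]
  | cons xy rest ih =>
    intro p text
    by_cases h0 : xy.2 = 0
    · have hp : pieceB xy p = "" := by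
        cases p <;> simp [pieceB, h0]
      simp [List.foldl, flagsB, h0, parseStepA, String.join, ih, hp]
    · have hstep : (parseStepA (p, text) xy) = (p, text ++ pieceB xy p) := by
        cases p <;> simp [parseStepA, pieceB, h0] <;> split_ifs <;> simp_all
      have hf : (if xy.2 = 0 then !p else p) = p := by simp [h0]
      simp only [List.foldl, flagsB, hstep, hf, List.zip_cons_cons, List.map, String.join, ih]
      rw [String.append_assoc]
      simp only [String.join] at *
      exact congrArg (text ++ ·) (foldl_str _ _).symm

-- ===== VERDICT (by name: the statement is the Claim_ definition above) =====
theorem parse_spec : Claim_equal_parse := by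
  intro l _
  unfold Spec_parse parse parse_alt
  simpa using key l false ""
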